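-- pv_equiv track=rewrite | github.com/nikitabolkar123/python_practice_problems | daily_prac_problems/practice_pblm.py | non_overlap_substrings
-- ===== SOURCE A (Python) =====
-- def non_overlap_substrings(str):
--     if not str:
--         return {()}
--
--     res = set()
--     for i in range(1, len(str) + 1):
--         prefix = str[:i]
--         suffix_combinations = non_overlap_substrings(str[i:])
--         for suffix_combination in suffix_combinations:
--             res.add((prefix,) + suffix_combination)
--         res.add((prefix,))
--
--     return res
-- ===== SOURCE B (Python) =====
-- def non_overlap_substrings(str):
--     # Bottom-up DP over suffix start index: F[j] is the set of partitions for
--     # str[j:] (F[n] = {()}); each suffix's set is computed once and reused,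
--     # instead of being recomputed by plain recursion as in the original.
--     n = len(str)
--     F = [None] * (n + 1)
--     F[n] = {()}
--     for j in range(n - 1, -1, -1):
--         res = set()
--         for i in range(j + 1, n + 1):
--             prefix = str[j:i]
--             for sc in F[i]:
--                 res.add((prefix,) + sc)
--             res.add((prefix,))
--         F[j] = res
--     return F[0]
-- ===== Notes on version B (the rewrite author's own statement) =====
-- stated objective: alternative
-- what changed: A recomputes the partition set of every suffix many times via plain recursion; B builds a bottom-up table F indexed by suffix start, computing each suffix's partition set exactly once and reusing it (the result's own size still dominates the total cost).
import Mathlib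
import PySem

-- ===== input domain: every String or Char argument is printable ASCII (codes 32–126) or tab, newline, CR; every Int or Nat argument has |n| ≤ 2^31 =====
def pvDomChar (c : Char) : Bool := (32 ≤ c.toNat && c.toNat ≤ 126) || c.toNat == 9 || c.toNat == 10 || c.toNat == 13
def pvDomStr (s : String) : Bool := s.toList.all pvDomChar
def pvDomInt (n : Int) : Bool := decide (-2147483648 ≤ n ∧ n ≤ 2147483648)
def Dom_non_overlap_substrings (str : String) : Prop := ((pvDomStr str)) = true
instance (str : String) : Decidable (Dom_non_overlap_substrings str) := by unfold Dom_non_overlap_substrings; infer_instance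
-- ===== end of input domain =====

-- B replaces A's plain recursion (which recomputes the partition set of every suffix many
-- times) by a bottom-up table over suffix start indices, computing each suffix's set once
-- and reusing it (objective: alternative; the output's own size dominates the cost).

-- ===== PORT A =====
-- A recurses on str[i:] with i ≥ 1; the Nat fuel (= length of the string) only makes that
-- recursion structural and is always sufficient at the top call.
-- str[:i] / str[i:] with 1 ≤ i ≤ len(str) are exactly List.take / List.drop of the code points.
def pvGoA : Nat → List Char → PySem.Set (List String)
  | _, [] => PySem.Set.ofList [[]]                    -- if not str: return {()}
  | 0, _ :: _ => PySem.Set.empty                      -- unreachable: fuel ≥ length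
  | fuel + 1, c :: rest =>
    (PySem.List.pyRange 1 (((c :: rest).length : Int) + 1)).foldl
      (fun res i =>
        let pfx : String := String.ofList ((c :: rest).take i.toNat)
        let sufs := pvGoA fuel ((c :: rest).drop i.toNat)
        (sufs.foldl (fun r sc => PySem.Set.add r (pfx :: sc)) res).add [pfx])
      PySem.Set.empty

def non_overlap_substrings (str : String) : List (List String) :=
  pvGoA str.toList.length str.toList

-- ===== PORT B =====
-- Source B's inner loop 'for i in range(j+1, n+1)' over the memoized sets F[i]; the table for
-- the suffix starting at j+1 is carried as a list whose entry k is F[j+1+k], so i = j+1+k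
-- and str[j:i] is the (k+1)-prefix of the current suffix.
def pvRowB (s : List Char) (table : List (PySem.Set (List String))) : PySem.Set (List String) :=
  (table.zipIdx).foldl
    (fun res p =>
      let pfx : String := String.ofList (s.take (p.2 + 1))   -- 'prefix' is a Lean keyword
      ((p.1.foldl (fun r sc => PySem.Set.add r (pfx :: sc)) res).add [pfx]))
    PySem.Set.empty

-- Source B's outer loop 'for j in range(n-1, -1, -1)' fills F back to front: the table for a
-- suffix c :: rest is the new row consed onto the table for rest (F[n] = {()}).
def pvTableB : List Char → List (PySem.Set (List String))
  | [] => [PySem.Set.ofList [[]]]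
  | c :: rest =>
    let t := pvTableB rest
    pvRowB (c :: rest) t :: t

def non_overlap_substrings_alt (str : String) : List (List String) :=
  (pvTableB str.toList).headD []                      -- return F[0]

-- ===== PRECONDITION & SPEC =====
def Spec_non_overlap_substrings (str : String) (out : List (List String)) : Prop :=
  out = non_overlap_substrings_alt str
instance (str : String) (out : List (List String)) : Decidable (Spec_non_overlap_substrings str out) := by
  unfold Spec_non_overlap_substrings; infer_instance

-- ===== CLAIM =====
def Claim_equal_non_overlap_substrings : Prop :=
  ∀ (str : String), Dom_non_overlap_substrings str →
    Spec_non_overlap_substrings str (non_overlap_substrings str)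

-- ===== LEMMAS AND PROOFS =====

-- B's result for the whole current suffix (row 0 of the table).
def pvF (s : List Char) : PySem.Set (List String) := (pvTableB s).headD []

lemma pvTableB_getD (s : List Char) : ∀ k, k ≤ s.length →
    (pvTableB s).getD k [] = pvF (s.drop k) := by
  induction s with
  | nil =>
    intro k hk
    have : k = 0 := by simpa using hk
    subst this; rfl
  | cons c rest ih =>
    intro k hk
    cases k with
    | zero => rfl
    | succ k => simpa [pvTableB] using ih k (by simpa using hk)

lemma pvFoldl_zipIdx {α β : Type} (d : α) (f : β → α × Nat → β) (l : List α) :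
    ∀ (n : Nat) (acc : β), (l.zipIdx n).foldl f acc
      = (List.range l.length).foldl (fun acc k => f acc (l.getD k d, k + n)) acc := by
  induction l with
  | nil => intro n acc; rfl
  | cons x xs ih =>
    intro n acc
    rw [List.zipIdx_cons, List.foldl_cons, ih (n + 1), List.length_cons,
      List.range_succ_eq_map, List.foldl_cons, List.foldl_map]
    show _ = List.foldl (fun a k => f a ((x :: xs).getD (k + 1) d, (k + 1) + n))
      (f acc ((x :: xs).getD 0 d, 0 + n)) (List.range xs.length)
    congr 1
    · funext a k
      simp only [List.getD_cons_succ]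
      congr 2
      omega
    · simp

lemma pvPyRange_one (n : Nat) :
    PySem.List.pyRange 1 ((n : Int) + 1) = (List.range n).map (fun (k : Nat) => ((k : Int) + 1)) := by
  induction n with
  | zero => rfl
  | succ n ih =>
    rw [show ((n + 1 : Nat) : Int) + 1 = ((n : Int) + 1) + 1 by push_cast; ring,
      PySem.List.pyRange_one_succ_right (by omega), ih, List.range_succ]
    simp

lemma pvMainA : ∀ (fuel : Nat) (s : List Char), s.length ≤ fuel → pvGoA fuel s = pvF s := by
  intro fuel
  induction fuel with
  | zero =>
    intro s hs
    have : s = [] := List.length_eq_zero_iff.mp (Nat.le_zero.mp hs)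
    subst this; rfl
  | succ fuel ih =>
    intro s hs
    match s with
    | [] => rfl
    | c :: rest =>
      show (PySem.List.pyRange 1 (((c :: rest).length : Int) + 1)).foldl _ PySem.Set.empty
        = pvRowB (c :: rest) (pvTableB rest)
      rw [pvPyRange_one, List.foldl_map]
      unfold pvRowB
      rw [pvFoldl_zipIdx ([] : PySem.Set (List String)) _ _ 0 PySem.Set.empty]
      have hlentab : (pvTableB rest).length = rest.length + 1 := by
        clear hs ih
        induction rest with
        | nil => rfl
        | cons c' r' ih' => simp [pvTableB, ih']
      rw [hlentab]
      show (List.range ((c :: rest).length)).foldl _ _ = (List.range ((c :: rest).length)).foldl _ _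
      refine PySem.List.foldl_congr_mem _ _ _ _ ?_
      intro res k hk
      rw [List.mem_range] at hk
      have htoNat : (((k : Nat) : Int) + 1).toNat = k + 1 := by omega
      simp only [htoNat]
      have hdrople : ((c :: rest).drop (k + 1)).length ≤ fuel := by
        rw [List.length_drop]
        simp only [List.length_cons] at hs ⊢
        omega
      rw [ih _ hdrople,
        pvTableB_getD rest k (by simp only [List.length_cons] at hk; omega),
        Nat.add_zero, List.drop_succ_cons]

-- ===== VERDICT =====
theorem non_overlap_substrings_spec : Claim_equal_non_overlap_substrings := by
  intro str _
  show non_overlap_substrings str = non_overlap_substrings_alt str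
  exact pvMainA _ _ (le_refl _)
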